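-- pv_equiv track=rewrite | github.com/Rahul-chunduru/Combinatorial | lexchain.py | chainer
-- ===== SOURCE A (Python) =====
-- import copy
--
-- def chainer(a):
-- 	b = []
-- 	if(a == []):
-- 	 	return b
-- 	else:
-- 		r = a[0]
-- 		c = chainer(a[1:])
-- 		b = copy.deepcopy(c)
-- 		for x in c:
-- 			x.reverse()
-- 			x.append(r)
-- 			x.reverse()
--
-- 		c.reverse() ;
-- 		c.append([r]);
-- 		c.reverse() ;
-- 		c.extend(b) ;
-- 		return c;
-- ===== SOURCE B (Python) =====
-- def chainer(a):
--     sub = []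
--     for r in reversed(a):
--         sub = [[r]] + [[r] + x for x in sub] + sub
--     return sub
-- ===== Notes on version B (the rewrite author's own statement) =====
-- stated objective: simpler
-- what changed: Replaces A's recursion with deepcopy and triple reverse/append/reverse mutation tricks by a bottom-up loop over reversed(a) that rebuilds the accumulator as [[r]] + [r]-prepended copies + old accumulator.
import Mathlib
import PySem

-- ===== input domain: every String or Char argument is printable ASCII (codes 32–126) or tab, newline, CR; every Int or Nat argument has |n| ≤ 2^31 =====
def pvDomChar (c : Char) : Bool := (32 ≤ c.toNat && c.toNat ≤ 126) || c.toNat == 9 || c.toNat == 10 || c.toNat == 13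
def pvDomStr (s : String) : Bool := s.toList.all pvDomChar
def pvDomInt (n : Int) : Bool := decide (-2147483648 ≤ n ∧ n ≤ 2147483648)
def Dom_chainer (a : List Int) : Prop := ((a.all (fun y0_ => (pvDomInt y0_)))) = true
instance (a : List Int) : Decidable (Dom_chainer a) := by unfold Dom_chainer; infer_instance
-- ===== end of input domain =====

-- B replaces A's recursion (with deepcopy and reverse/append/reverse tricks) by a
-- bottom-up loop over reversed(a); simpler decomposition, same exact output order.

-- ===== PORT A =====
-- A: recursive; result = [[r]] ++ (each sublist of c with r prepended, via reverse/append/reverse) ++ deepcopy c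
def chainer (a : List Int) : List (List Int) :=
  match a with
  | [] => []
  | r :: rest =>
      let c := chainer rest
      let b := c                                   -- copy.deepcopy(c): value copy
      let c := c.map (fun x => ((x.reverse ++ [r]).reverse))  -- per-element reverse; append r; reverse
      let c := ((c.reverse ++ [[r]])).reverse      -- c.reverse(); c.append([r]); c.reverse()
      c ++ b                                       -- c.extend(b)

-- ===== PORT B =====
-- B: iterative accumulator over reversed(a)
def chainer_alt (a : List Int) : List (List Int) :=
  a.reverse.foldl (fun sub r => [r] :: (sub.map (fun x => r :: x)) ++ sub) []

-- ===== PRECONDITION & SPEC =====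
def Spec_chainer (a : List Int) (out : List (List Int)) : Prop := out = chainer_alt a
instance (a : List Int) (out : List (List Int)) : Decidable (Spec_chainer a out) := by unfold Spec_chainer; infer_instance

-- ===== CLAIM =====
def Claim_equal_chainer : Prop := ∀ (a : List Int), Dom_chainer a → Spec_chainer a (chainer a)

-- ===== LEMMAS AND PROOFS =====
theorem chainer_alt_cons (r : Int) (rest : List Int) :
    chainer_alt (r :: rest) =
      [r] :: (chainer_alt rest).map (fun x => r :: x) ++ chainer_alt rest := by
  unfold chainer_alt
  rw [List.reverse_cons, List.foldl_append]
  rfl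

theorem chainer_eq (a : List Int) : chainer a = chainer_alt a := by
  induction a with
  | nil => rfl
  | cons r rest ih =>
      rw [chainer_alt_cons, ← ih]
      show ((((chainer rest).map
          (fun x => ((x.reverse ++ [r]).reverse))).reverse ++ [[r]])).reverse
          ++ chainer rest
        = [r] :: (chainer rest).map (fun x => r :: x) ++ chainer rest
      simp only [List.reverse_append, List.reverse_reverse, List.reverse_cons,
        List.reverse_nil, List.nil_append, List.cons_append]

-- ===== VERDICT =====
theorem chainer_spec : Claim_equal_chainer := by
  intro a _
  exact chainer_eq a
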